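-- pv_equiv track=rewrite | github.com/HARP-research-Inc/CCD_tensor_training | theoretical_evaluation/optimized_complexity_estimate.py | scan_article
-- ===== SOURCE A (Python) =====
-- def scan_article(article):
--     """Process a single article and return its statistics."""
--     # Simple sentence splitting by periods
--     text = article["text"]
--     sentences = []
--     for line in text.split('\n'):
--         for sent in line.split('.'):
--             sent = sent.strip()
--             if sent:  # Only add non-empty sentences
--                 sentences.append(sent)
--
--     total_sentences = len(sentences)
--     total_tokens = 0
--
--     # Count tokens using simple whitespace splitting for all modes
--     for sent in sentences:
--         total_tokens += len(sent.split())
--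
--     return {
--         "sentences": total_sentences,
--         "tokens": total_tokens
--     }
-- ===== SOURCE B (Python) =====
-- def scan_article(article):
--     """Process a single article and return its statistics (single-pass state machine)."""
--     text = article["text"]
--     sentences = 0
--     tokens = 0
--     in_token = False
--     seg_has_content = False
--     for ch in text:
--         if ch == '\n' or ch == '.':
--             if seg_has_content:
--                 sentences += 1
--             in_token = False
--             seg_has_content = False
--         elif ch.isspace():
--             in_token = False
--         else:
--             if not in_token:
--                 tokens += 1
--             in_token = True
--             seg_has_content = True
--     if seg_has_content:
--         sentences += 1
--     return {"sentences": sentences, "tokens": tokens}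
-- ===== Notes on version B (the rewrite author's own statement) =====
-- stated objective: faster
-- what changed: Replaces the nested split('\n')/split('.')/strip()/split() passes and the intermediate sentences list by a single left-to-right character scan maintaining two flags (inside a token, current segment has content), counting sentences and tokens in one pass with no intermediate lists.
import Mathlib
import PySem

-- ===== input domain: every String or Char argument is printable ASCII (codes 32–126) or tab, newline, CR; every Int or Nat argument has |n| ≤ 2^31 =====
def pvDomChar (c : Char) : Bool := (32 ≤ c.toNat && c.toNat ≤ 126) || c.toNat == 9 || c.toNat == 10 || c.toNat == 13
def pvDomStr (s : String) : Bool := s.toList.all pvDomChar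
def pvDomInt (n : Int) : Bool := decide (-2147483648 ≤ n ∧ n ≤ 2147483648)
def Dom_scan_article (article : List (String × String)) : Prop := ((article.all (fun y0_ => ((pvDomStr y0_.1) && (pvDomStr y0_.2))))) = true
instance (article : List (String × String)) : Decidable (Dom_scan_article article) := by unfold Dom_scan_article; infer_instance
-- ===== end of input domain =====

-- B replaces A's nested split/strip passes and intermediate sentence list by a single-pass character state machine.


-- ===== PORT A =====
-- text = article["text"]; Pre_ guarantees the key is present (the .getD "" default is never reached inside Pre_)
def scan_article (article : List (String × String)) : List (String × Int) :=
  let text := ((PySem.Dict.get? (PySem.Dict.mk article) "text").getD "").toList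
  let sentences := (PySem.Chars.splitOn text ['\n']).foldl (fun acc line =>
    (PySem.Chars.splitOn line ['.']).foldl (fun acc2 sent0 =>
      let sent := PySem.Chars.strip sent0
      if !sent.isEmpty then acc2 ++ [sent] else acc2) acc) ([] : List (List Char))
  let total_sentences : Int := (sentences.length : Int)
  let total_tokens : Int := sentences.foldl (fun acc sent => acc + ((PySem.Chars.split₀ sent).length : Int)) 0
  [("sentences", total_sentences), ("tokens", total_tokens)]

-- ===== PORT B =====
def scan_article_alt (article : List (String × String)) : List (String × Int) :=
  let text := ((PySem.Dict.get? (PySem.Dict.mk article) "text").getD "").toList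
  let st := text.foldl (fun st c =>
      if c = '\n' ∨ c = '.' then
        (if st.2.2.2 then st.1 + 1 else st.1, st.2.1, false, false)
      else if PySem.Chars.isspace c then
        (st.1, st.2.1, false, st.2.2.2)
      else
        (st.1, if st.2.2.1 then st.2.1 else st.2.1 + 1, true, true))
    (((0 : Int), (0 : Int), false, false) : Int × Int × Bool × Bool)
  [("sentences", if st.2.2.2 then st.1 + 1 else st.1), ("tokens", st.2.1)]

-- ===== PRECONDITION & SPEC =====
-- Pre_ excludes only dicts without a "text" key, on which Python A raises KeyError (B raises there too).
def Pre_scan_article (article : List (String × String)) : Prop :=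
  (PySem.Dict.get? (PySem.Dict.mk article) "text").isSome = true
instance (article : List (String × String)) : Decidable (Pre_scan_article article) := by
  unfold Pre_scan_article; infer_instance
def pvWitness_scan_article : (List (String × String)) := [("text", "Hi there. Bye\n ok")]
def Spec_scan_article (article : List (String × String)) (out : List (String × Int)) : Prop := out = scan_article_alt article
instance (article : List (String × String)) (out : List (String × Int)) : Decidable (Spec_scan_article article out) := by unfold Spec_scan_article; infer_instance

-- ===== CLAIM (what is proved, stated in full; the proofs are below) =====
def Claim_equal_scan_article : Prop := ∀ (article : List (String × String)), Dom_scan_article article → Pre_scan_article article → Spec_scan_article article (scan_article article)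

-- ===== LEMMAS AND PROOFS =====

-- split on a single delimiter character, structural form of PySem.Chars.splitOn s [d]
def splitC (d : Char) : List Char → List (List Char)
  | [] => [[]]
  | c :: cs => if c = d then [] :: splitC d cs else (splitC d cs).modifyHead (c :: ·)

-- split on the combined delimiter class {'\n', '.'}
def splitD : List Char → List (List Char)
  | [] => [[]]
  | c :: cs => if c = '\n' ∨ c = '.' then [] :: splitD cs else (splitD cs).modifyHead (c :: ·)

-- whitespace-token count of a segment, given whether we are already inside a token
def wcount : List Char → Bool → Int
  | [], _ => 0
  | c :: cs, it => if PySem.Chars.isspace c then wcount cs false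
                   else (if it then 0 else 1) + wcount cs true

-- B's final sentence count, given the "current segment has content" flag
def SBf : List Char → Bool → Int
  | [], hc => if hc then 1 else 0
  | c :: cs, hc => if c = '\n' ∨ c = '.' then (if hc then 1 else 0) + SBf cs false
                   else if PySem.Chars.isspace c then SBf cs hc
                   else SBf cs true

-- B's final token count, given the "inside a token" flag
def TBf : List Char → Bool → Int
  | [], _ => 0
  | c :: cs, it => if c = '\n' ∨ c = '.' then TBf cs false
                   else if PySem.Chars.isspace c then TBf cs false
                   else (if it then 0 else 1) + TBf cs true

theorem splitC_ne_nil (d : Char) (cs : List Char) : splitC d cs ≠ [] := by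
  induction cs with
  | nil => simp [splitC]
  | cons c cs ih =>
    unfold splitC; split
    · simp
    · cases h : splitC d cs with
      | nil => exact absurd h ih
      | cons a t => simp [List.modifyHead]

theorem splitD_ne_nil (cs : List Char) : splitD cs ≠ [] := by
  induction cs with
  | nil => simp [splitD]
  | cons c cs ih =>
    unfold splitD; split
    · simp
    · cases h : splitD cs with
      | nil => exact absurd h ih
      | cons a t => simp [List.modifyHead]

theorem splitOn_go_eq (d : Char) : ∀ (fuel : Nat) (l : List Char), l.length < fuel →
    ∀ (cur : List Char) (acc : List (List Char)),
    PySem.Chars.splitOn.go [d] fuel l cur acc = acc.reverse ++ (splitC d l).modifyHead (cur.reverse ++ ·) := by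
  intro fuel
  induction fuel with
  | zero => intro l h; omega
  | succ fuel ih =>
    intro l h cur acc
    cases l with
    | nil => simp [PySem.Chars.splitOn.go, splitC]
    | cons c rest =>
      rw [PySem.Chars.splitOn.go]
      by_cases hc : c = d
      · have hp : List.isPrefixOf [d] (c :: rest) = true := by simp [List.isPrefixOf, hc]
        rw [if_pos hp]
        simp only [List.length_cons] at h
        rw [show List.drop [d].length (c :: rest) = rest from by simp,
          ih rest (by omega) [] (cur.reverse :: acc)]
        simp [splitC, hc, List.modifyHead]
        cases hs : splitC d rest with
        | nil => exact absurd hs (splitC_ne_nil d rest)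
        | cons a t => simp [List.modifyHead]
      · have hp : List.isPrefixOf [d] (c :: rest) = false := by
          simp [List.isPrefixOf]; exact fun h' => absurd h'.symm hc
        rw [if_neg (by simp [hp])]
        simp only [List.length_cons] at h
        rw [ih rest (by omega) (c :: cur) acc]
        simp [splitC, hc]
        cases hs : splitC d rest with
        | nil => exact absurd hs (splitC_ne_nil d rest)
        | cons a t => simp [List.modifyHead]

theorem splitOn_eq_splitC (d : Char) (cs : List Char) :
    PySem.Chars.splitOn cs [d] = splitC d cs := by
  rw [PySem.Chars.splitOn, splitOn_go_eq d (cs.length + 1) cs (by omega)]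
  cases hs : splitC d cs with
  | nil => exact absurd hs (splitC_ne_nil d cs)
  | cons a t => simp [List.modifyHead]

theorem flatMap_splitC (cs : List Char) :
    (splitC '\n' cs).flatMap (splitC '.') = splitD cs := by
  induction cs with
  | nil => simp [splitC, splitD]
  | cons c cs ih =>
    by_cases hn : c = '\n'
    · simp [splitC, splitD, hn, ← ih]
    · by_cases hd : c = '.'
      · cases h : splitC '\n' cs with
        | nil => exact absurd h (splitC_ne_nil _ _)
        | cons a t =>
          simp [splitC, splitD, hd, hn, h, List.modifyHead, ← ih]
      · cases h : splitC '\n' cs with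
        | nil => exact absurd h (splitC_ne_nil _ _)
        | cons a t =>
          cases h2 : splitC '.' a with
          | nil => exact absurd h2 (splitC_ne_nil _ _)
          | cons b u =>
            simp [splitC, splitD, hd, hn, h, h2, List.modifyHead, ← ih]

theorem split₀_go_length (s : List Char) : ∀ (cur : List Char) (acc : List (List Char)),
    ((PySem.Chars.split₀.go s cur acc).length : Int)
      = acc.length + (if cur.isEmpty then wcount s false else 1 + wcount s true) := by
  induction s with
  | nil =>
    intro cur acc
    rw [PySem.Chars.split₀.go]
    cases cur <;> simp [wcount]
  | cons c rest ih =>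
    intro cur acc
    rw [PySem.Chars.split₀.go]
    by_cases hs : PySem.Chars.isspace c
    · rw [if_pos hs]
      cases cur <;> simp [ih, wcount, hs] <;> ring
    · rw [if_neg hs]
      cases cur <;> simp [ih, wcount, hs] <;> ring

theorem split₀_length (s : List Char) :
    ((PySem.Chars.split₀ s).length : Int) = wcount s false := by
  rw [PySem.Chars.split₀, split₀_go_length]; simp

theorem dropWhile_nil_iff_all {p : Char → Bool} (s : List Char) :
    List.dropWhile p s = [] ↔ s.all p = true := by
  rw [List.dropWhile_eq_nil_iff, List.all_eq_true]

theorem strip_isEmpty (s : List Char) :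
    (PySem.Chars.strip s).isEmpty = s.all PySem.Chars.isspace := by
  rw [Bool.eq_iff_iff]
  simp only [PySem.Chars.strip, PySem.Chars.rstrip, PySem.Chars.lstrip, List.isEmpty_iff,
    List.reverse_eq_nil_iff, dropWhile_nil_iff_all, List.all_eq_true, List.mem_reverse]
  constructor
  · intro h c hc
    by_cases hm : c ∈ List.dropWhile PySem.Chars.isspace s
    · exact h c hm
    · have hsplit := List.takeWhile_append_dropWhile (p := PySem.Chars.isspace) (l := s)
      have : c ∈ List.takeWhile PySem.Chars.isspace s ++ List.dropWhile PySem.Chars.isspace s := by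
        rw [hsplit]; exact hc
      rcases List.mem_append.1 this with h1 | h2
      · exact List.mem_takeWhile_imp h1
      · exact absurd h2 hm
  · intro h c hc
    exact h c ((List.dropWhile_sublist _).mem hc)

theorem wcount_allws (s : List Char) (h : s.all PySem.Chars.isspace = true) :
    ∀ b, wcount s b = 0 := by
  induction s with
  | nil => intro b; rfl
  | cons c cs ih =>
    simp only [List.all_cons, Bool.and_eq_true] at h
    intro b; simp [wcount, h.1, ih h.2]

theorem wcount_append_ws (s t : List Char) (h : t.all PySem.Chars.isspace = true) :
    ∀ b, wcount (s ++ t) b = wcount s b := by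
  induction s with
  | nil => intro b; simpa [wcount] using wcount_allws t h b
  | cons c cs ih =>
    intro b
    by_cases hc : PySem.Chars.isspace c <;> simp [wcount, hc, ih]

theorem wcount_lstrip (s : List Char) :
    wcount (PySem.Chars.lstrip s) false = wcount s false := by
  rw [PySem.Chars.lstrip]
  induction s with
  | nil => rfl
  | cons c cs ih =>
    by_cases hc : PySem.Chars.isspace c <;> simp [List.dropWhile, hc, wcount, ih]

theorem wcount_rstrip (s : List Char) :
    wcount (PySem.Chars.rstrip s) false = wcount s false := by
  rw [PySem.Chars.rstrip]
  have hdec : s = (List.dropWhile PySem.Chars.isspace s.reverse).reverse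
      ++ (List.takeWhile PySem.Chars.isspace s.reverse).reverse := by
    rw [← List.reverse_append, List.takeWhile_append_dropWhile, List.reverse_reverse]
  have hall : ((List.takeWhile PySem.Chars.isspace s.reverse).reverse).all PySem.Chars.isspace = true := by
    simp only [List.all_eq_true, List.mem_reverse]
    exact fun c hc => List.mem_takeWhile_imp hc
  conv_rhs => rw [hdec]
  rw [wcount_append_ws _ _ hall]

theorem wcount_strip (s : List Char) :
    wcount (PySem.Chars.strip s) false = wcount s false := by
  rw [PySem.Chars.strip, wcount_rstrip, wcount_lstrip]

theorem SBf_eq (cs : List Char) : ∀ (hc : Bool),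
    SBf cs hc = (if hc || (splitD cs).headI.any (fun c => !PySem.Chars.isspace c) then 1 else 0)
      + (((splitD cs).tail.countP (fun seg => seg.any (fun c => !PySem.Chars.isspace c)) : Nat) : Int) := by
  induction cs with
  | nil => intro hc; simp [SBf, splitD]
  | cons c cs ih =>
    intro hc
    by_cases hd : c = '\n' ∨ c = '.'
    · cases h : splitD cs with
      | nil => exact absurd h (splitD_ne_nil cs)
      | cons a t =>
        simp only [SBf, splitD, hd, if_pos, ih, h]
        simp only [List.headI, List.tail, List.countP_cons, List.any_nil]
        cases hc <;> by_cases ha : a.any (fun c => !PySem.Chars.isspace c) = true <;>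
          simp [ha] <;> push_cast <;> ring
    · cases h : splitD cs with
      | nil => exact absurd h (splitD_ne_nil cs)
      | cons a t =>
        by_cases hs : PySem.Chars.isspace c
        · simp only [SBf, splitD, hd, hs, if_pos, ih, h, List.modifyHead]
          simp [hs]
        · simp only [SBf, splitD, hd, hs, ih, h, List.modifyHead]
          simp [hs]

theorem TBf_eq (cs : List Char) : ∀ (it : Bool),
    TBf cs it = wcount (splitD cs).headI it + ((splitD cs).tail.map (fun seg => wcount seg false)).sum := by
  induction cs with
  | nil => intro it; simp [TBf, splitD, wcount]
  | cons c cs ih =>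
    intro it
    by_cases hd : c = '\n' ∨ c = '.'
    · cases h : splitD cs with
      | nil => exact absurd h (splitD_ne_nil cs)
      | cons a t =>
        simp only [TBf, splitD, hd, if_pos, ih, h]
        simp [wcount]
    · cases h : splitD cs with
      | nil => exact absurd h (splitD_ne_nil cs)
      | cons a t =>
        by_cases hs : PySem.Chars.isspace c
        · simp only [TBf, splitD, hd, hs, if_pos, ih, h, List.modifyHead]
          simp [wcount, hs]
        · simp only [TBf, splitD, hd, hs, ih, h, List.modifyHead]
          simp [wcount, hs]
          ring

-- the step function of B's single fold
def bstep (st : Int × Int × Bool × Bool) (c : Char) : Int × Int × Bool × Bool :=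
  if c = '\n' ∨ c = '.' then
    (if st.2.2.2 then st.1 + 1 else st.1, st.2.1, false, false)
  else if PySem.Chars.isspace c then
    (st.1, st.2.1, false, st.2.2.2)
  else
    (st.1, if st.2.2.1 then st.2.1 else st.2.1 + 1, true, true)

theorem foldB_spec (cs : List Char) : ∀ (s t : Int) (it hc : Bool),
    (if (cs.foldl bstep (s, t, it, hc)).2.2.2 then (cs.foldl bstep (s, t, it, hc)).1 + 1
       else (cs.foldl bstep (s, t, it, hc)).1) = s + SBf cs hc
    ∧ (cs.foldl bstep (s, t, it, hc)).2.1 = t + TBf cs it := by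
  induction cs with
  | nil => intro s t it hc; cases hc <;> simp [SBf, TBf]
  | cons c cs ih =>
    intro s t it hc
    by_cases hd : c = '\n' ∨ c = '.'
    · have hb : bstep (s, t, it, hc) c = (if hc then s + 1 else s, t, false, false) := by
        simp [bstep, hd]
      rw [List.foldl_cons, hb]
      obtain ⟨h1, h2⟩ := ih (if hc then s + 1 else s) t false false
      refine ⟨?_, by rw [h2]; simp [TBf, hd]⟩
      rw [h1]; cases hc <;> simp [SBf, hd] <;> ring
    · by_cases hs : PySem.Chars.isspace c
      · have hb : bstep (s, t, it, hc) c = (s, t, false, hc) := by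
          simp [bstep, hd, hs]
        rw [List.foldl_cons, hb]
        obtain ⟨h1, h2⟩ := ih s t false hc
        exact ⟨by rw [h1]; simp [SBf, hd, hs], by rw [h2]; simp [TBf, hd, hs]⟩
      · have hb : bstep (s, t, it, hc) c = (s, if it then t else t + 1, true, true) := by
          simp [bstep, hd, hs]
        rw [List.foldl_cons, hb]
        obtain ⟨h1, h2⟩ := ih s (if it then t else t + 1) true true
        refine ⟨by rw [h1]; simp [SBf, hd, hs], ?_⟩
        rw [h2]; cases it <;> simp [TBf, hd, hs] <;> ring

theorem nonempty_strip_eq (seg : List Char) :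
    (!(PySem.Chars.strip seg).isEmpty) = seg.any (fun c => !PySem.Chars.isspace c) := by
  rw [strip_isEmpty, Bool.eq_iff_iff]
  simp [List.all_eq_true, List.any_eq_true]

theorem sum_wcount_filter (l : List (List Char)) :
    ((l.filter (fun seg => seg.any (fun c => !PySem.Chars.isspace c))).map (fun seg => wcount seg false)).sum
      = (l.map (fun seg => wcount seg false)).sum := by
  induction l with
  | nil => rfl
  | cons a t ih =>
    by_cases ha : a.any (fun c => !PySem.Chars.isspace c) = true
    · simp [List.filter_cons, ha, ih]
    · have hall : a.all PySem.Chars.isspace = true := by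
        simp only [List.any_eq_true, Bool.not_eq_true'] at ha
        simp only [List.all_eq_true]
        intro c hc
        by_contra hcc
        exact ha ⟨c, hc, by simp [hcc]⟩
      simp [List.filter_cons, ha, ih, wcount_allws a hall false]

theorem A_sentences (text : List Char) :
    ((PySem.Chars.splitOn text ['\n']).foldl (fun acc line =>
      (PySem.Chars.splitOn line ['.']).foldl (fun acc2 sent0 =>
        let sent := PySem.Chars.strip sent0
        if !sent.isEmpty then acc2 ++ [sent] else acc2) acc) ([] : List (List Char)))
    = ((splitD text).filter (fun seg => seg.any (fun c => !PySem.Chars.isspace c))).map PySem.Chars.strip := by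
  have hinner : ∀ (line : List Char) (acc : List (List Char)),
      (PySem.Chars.splitOn line ['.']).foldl (fun acc2 sent0 =>
        let sent := PySem.Chars.strip sent0
        if !sent.isEmpty then acc2 ++ [sent] else acc2) acc
      = acc ++ ((splitC '.' line).filter (fun seg => seg.any (fun c => !PySem.Chars.isspace c))).map PySem.Chars.strip := by
    intro line acc
    rw [splitOn_eq_splitC]
    have := PySem.List.foldl_append_if (l := splitC '.' line) (acc := acc)
      (p := fun sent0 => !(PySem.Chars.strip sent0).isEmpty) (f := PySem.Chars.strip)
    simp only [this]
    rw [List.filter_congr (fun seg _ => nonempty_strip_eq seg)]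
  rw [splitOn_eq_splitC]
  simp only [hinner]
  rw [PySem.List.foldl_append_eq_flatMap, List.nil_append]
  rw [← List.map_flatMap, ← List.filter_flatMap, flatMap_splitC]

theorem ports_eq (text : List Char) :
    ([("sentences",
        (((PySem.Chars.splitOn text ['\n']).foldl (fun acc line =>
          (PySem.Chars.splitOn line ['.']).foldl (fun acc2 sent0 =>
            let sent := PySem.Chars.strip sent0
            if !sent.isEmpty then acc2 ++ [sent] else acc2) acc) ([] : List (List Char))).length : Int)),
      ("tokens",
        ((PySem.Chars.splitOn text ['\n']).foldl (fun acc line =>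
          (PySem.Chars.splitOn line ['.']).foldl (fun acc2 sent0 =>
            let sent := PySem.Chars.strip sent0
            if !sent.isEmpty then acc2 ++ [sent] else acc2) acc) ([] : List (List Char))).foldl
          (fun acc sent => acc + ((PySem.Chars.split₀ sent).length : Int)) 0)] : List (String × Int))
    = [("sentences",
        if (text.foldl bstep ((0 : Int), (0 : Int), false, false)).2.2.2 then
          (text.foldl bstep ((0 : Int), (0 : Int), false, false)).1 + 1
        else (text.foldl bstep ((0 : Int), (0 : Int), false, false)).1),
       ("tokens", (text.foldl bstep ((0 : Int), (0 : Int), false, false)).2.1)] := by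
  obtain ⟨hS, hT⟩ := foldB_spec text 0 0 false false
  rw [hS, hT, zero_add, zero_add, A_sentences]
  cases hsp : splitD text with
  | nil => exact absurd hsp (splitD_ne_nil text)
  | cons a t =>
    have hsent : (((((a :: t) : List (List Char)).filter
          (fun seg => seg.any (fun c => !PySem.Chars.isspace c))).map PySem.Chars.strip).length : Int)
        = SBf text false := by
      rw [SBf_eq, hsp, List.length_map, ← List.countP_eq_length_filter]
      simp only [List.headI, List.tail, Bool.false_or, List.countP_cons]
      by_cases ha : a.any (fun c => !PySem.Chars.isspace c) = true <;>
        simp [ha] <;> push_cast <;> ring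
    have htok : ((((a :: t) : List (List Char)).filter
          (fun seg => seg.any (fun c => !PySem.Chars.isspace c))).map PySem.Chars.strip).foldl
          (fun acc sent => acc + ((PySem.Chars.split₀ sent).length : Int)) 0
        = TBf text false := by
      rw [PySem.List.foldl_add (g := fun sent => ((PySem.Chars.split₀ sent).length : Int)), zero_add,
        List.map_map]
      have hmap : (((a :: t) : List (List Char)).filter
            (fun seg => seg.any (fun c => !PySem.Chars.isspace c))).map
            ((fun sent => ((PySem.Chars.split₀ sent).length : Int)) ∘ PySem.Chars.strip)
          = (((a :: t) : List (List Char)).filter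
            (fun seg => seg.any (fun c => !PySem.Chars.isspace c))).map (fun seg => wcount seg false) := by
        apply List.map_congr_left
        intro seg _
        simp only [Function.comp_apply, split₀_length, wcount_strip]
      rw [hmap, sum_wcount_filter, TBf_eq, hsp]
      simp [List.headI, List.tail]
    rw [hsent, htok]

-- ===== VERDICT (by name: the statement is the Claim_ definition above) =====
theorem scan_article_spec : Claim_equal_scan_article := by
  intro article _ _
  unfold Spec_scan_article scan_article scan_article_alt
  exact ports_eq ((PySem.Dict.get? (PySem.Dict.mk article) "text").getD "").toList
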